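-- pv_equiv track=rewrite | github.com/Dcodr-Coding-Club/Hack-the-Future | obfuscation/obfuscation.py | shift_odd_even
-- ===== SOURCE A (Python) =====
-- def shift_odd_even(chars):
--     new_chars = list(chars)
--     even_indices = [i for i in range(len(chars)) if i % 2 == 0]
--     odd_indices = [i for i in range(len(chars)) if i % 2 == 1]
--
--     if even_indices:
--         # Shift even positions one left: first even becomes second even, last even wraps to first.
--         for i in range(len(even_indices) - 1):
--             new_chars[even_indices[i]] = chars[even_indices[i + 1]]
--         new_chars[even_indices[-1]] = chars[even_indices[0]]
--
--     if odd_indices: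
--         # Shift odd positions one right: last odd becomes first odd, others shift right.
--         for i in range(len(odd_indices) - 1, 0, -1):
--             new_chars[odd_indices[i]] = chars[odd_indices[i - 1]]
--         new_chars[odd_indices[0]] = chars[odd_indices[-1]]
--
--     return new_chars
-- ===== SOURCE B (Python) =====
-- def shift_odd_even(chars):
--     n = len(chars)
--
--     def src(j):
--         if j % 2 == 0:
--             return j + 2 if j + 2 < n else 0
--         return j - 2 if j >= 3 else n - 1 - n % 2
--
--     return [chars[src(j)] for j in range(n)]
-- ===== Notes on version B (the rewrite author's own statement) =====
-- stated objective: simpler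
-- what changed: Replaces the index-list construction and the two element-shifting loops over a mutated copy by a single comprehension that computes, for each position, the closed-form source index of the rotation (even positions rotate left, odd positions rotate right).
import Mathlib
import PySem

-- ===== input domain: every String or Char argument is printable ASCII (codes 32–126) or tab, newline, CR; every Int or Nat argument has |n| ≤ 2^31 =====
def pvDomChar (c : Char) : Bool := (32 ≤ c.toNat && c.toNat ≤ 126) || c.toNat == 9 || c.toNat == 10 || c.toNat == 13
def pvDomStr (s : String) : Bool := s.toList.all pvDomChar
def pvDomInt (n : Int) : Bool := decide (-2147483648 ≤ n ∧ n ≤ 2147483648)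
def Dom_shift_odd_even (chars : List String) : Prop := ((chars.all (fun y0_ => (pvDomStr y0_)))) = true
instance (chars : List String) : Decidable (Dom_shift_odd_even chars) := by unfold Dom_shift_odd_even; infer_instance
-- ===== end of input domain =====

-- B computes each output position's source index in closed form (one comprehension) instead of
-- mutating a copy via two index-list shifting loops; objective: simpler. Same O(n) cost.


-- ===== PORT A =====
def shift_odd_even (chars : List String) : List String :=
  let new0 := chars
  let ev := (PySem.List.pyRange 0 (PySem.List.len chars) 1).filter
      (fun i => PySem.Int.mod i 2 == 0)
  let od := (PySem.List.pyRange 0 (PySem.List.len chars) 1).filter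
      (fun i => PySem.Int.mod i 2 == 1)
  let new1 :=
    if ev ≠ [] then
      let stepped := (PySem.List.pyRange 0 (PySem.List.len ev - 1) 1).foldl
        (fun nc i => PySem.List.pySetD nc (PySem.List.pyGetD ev i 0)
          (PySem.List.pyGetD chars (PySem.List.pyGetD ev (i + 1) 0) "")) new0
      PySem.List.pySetD stepped (PySem.List.pyGetD ev (-1) 0)
        (PySem.List.pyGetD chars (PySem.List.pyGetD ev 0 0) "")
    else new0
  if od ≠ [] then
    let stepped := (PySem.List.pyRange (PySem.List.len od - 1) 0 (-1)).foldl
      (fun nc i => PySem.List.pySetD nc (PySem.List.pyGetD od i 0)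
        (PySem.List.pyGetD chars (PySem.List.pyGetD od (i - 1) 0) "")) new1
    PySem.List.pySetD stepped (PySem.List.pyGetD od 0 0)
      (PySem.List.pyGetD chars (PySem.List.pyGetD od (-1) 0) "")
  else new1

-- ===== PORT B =====
def shift_odd_even_alt (chars : List String) : List String :=
  let n : Int := PySem.List.len chars
  (PySem.List.pyRange 0 n 1).map (fun j =>
    PySem.List.pyGetD chars
      (if PySem.Int.mod j 2 = 0 then (if j + 2 < n then j + 2 else 0)
       else (if 3 ≤ j then j - 2 else n - 1 - PySem.Int.mod n 2)) "")

-- ===== PRECONDITION & SPEC =====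
def Spec_shift_odd_even (chars : List String) (out : List String) : Prop := out = shift_odd_even_alt chars
instance (chars : List String) (out : List String) : Decidable (Spec_shift_odd_even chars out) := by unfold Spec_shift_odd_even; infer_instance

-- ===== CLAIM (what is proved, stated in full; the proofs are below) =====
def Claim_equal_shift_odd_even : Prop := ∀ (chars : List String), Dom_shift_odd_even chars → Spec_shift_odd_even chars (shift_odd_even chars)

-- ===== LEMMAS AND PROOFS =====
lemma pv_map_range_getD (l : List String) :
    (List.range l.length).map (fun j => l.getD j "") = l := by
  apply List.ext_getElem
  · simp
  · intro i h1 h2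
    simp [List.getD_eq_getElem?_getD, h2]

lemma pv_getD_map_range {α : Type} (k i : Nat) (f : Nat → α) (d : α) (h : i < k) :
    ((List.range k).map f).getD i d = f i := by
  simp [List.getD, h]

lemma pv_set_map_range (n j : Nat) (f : Nat → String) (v : String) (_h : j < n) :
    ((List.range n).map f).set j v = (List.range n).map (fun x => if x = j then v else f x) := by
  apply List.ext_getElem
  · simp
  · intro i h1 h2
    simp only [List.getElem_set, List.getElem_map, List.getElem_range]
    simp only [List.length_map] at h1
    by_cases hij : j = i
    · simp [hij]
    · rw [if_neg (by omega), if_neg (by omega)]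

lemma pv_getLast_map_range {α : Type} (k : Nat) (f : Nat → α) (h : (List.range k).map f ≠ []) :
    ((List.range k).map f).getLast h = f (k - 1) := by
  have hk : 0 < k := by by_contra hc; apply h; simp [List.length_eq_zero_iff] at *; omega
  rw [List.getLast_eq_getElem]
  simp

lemma pv_mod_two (a : Int) : PySem.Int.mod a 2 = a % 2 :=
  PySem.Int.mod_eq_emod_of_pos (by norm_num)

lemma pv_ev_eq (n : Nat) :
    ((PySem.List.pyRange 0 (n : Int) 1).filter (fun i => PySem.Int.mod i 2 == 0))
      = (List.range ((n + 1) / 2)).map (fun i => ((2 * i : Nat) : Int)) := by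
  induction n with
  | zero => simp [PySem.List.pyRange_one_eq_nil]
  | succ n ih =>
    have hc : ((n + 1 : Nat) : Int) = (n : Int) + 1 := by push_cast; ring
    rw [hc, PySem.List.pyRange_one_succ_right (by positivity), List.filter_append, ih]
    by_cases hp : n % 2 = 0
    · have h2 : (n + 1 + 1) / 2 = (n + 1) / 2 + 1 := by omega
      have hb : (PySem.Int.mod (n : Int) 2 == 0) = true := by
        simp [pv_mod_two]; omega
      rw [h2, List.range_succ, List.map_append]
      simp only [List.filter_cons, hb, if_true, List.filter_nil]
      congr 2
      push_cast; omega
    · have h2 : (n + 1 + 1) / 2 = (n + 1) / 2 := by omega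
      have hb : (PySem.Int.mod (n : Int) 2 == 0) = false := by
        simp only [pv_mod_two]; simp; omega
      rw [h2]
      simp only [List.filter_cons, hb, Bool.false_eq_true, if_false, List.filter_nil, List.append_nil]

lemma pv_od_eq (n : Nat) :
    ((PySem.List.pyRange 0 (n : Int) 1).filter (fun i => PySem.Int.mod i 2 == 1))
      = (List.range (n / 2)).map (fun i => ((2 * i + 1 : Nat) : Int)) := by
  induction n with
  | zero => simp [PySem.List.pyRange_one_eq_nil]
  | succ n ih =>
    have hc : ((n + 1 : Nat) : Int) = (n : Int) + 1 := by push_cast; ring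
    rw [hc, PySem.List.pyRange_one_succ_right (by positivity), List.filter_append, ih]
    by_cases hp : n % 2 = 1
    · have h2 : (n + 1) / 2 = n / 2 + 1 := by omega
      have hb : (PySem.Int.mod (n : Int) 2 == 1) = true := by
        simp [pv_mod_two]; omega
      rw [h2, List.range_succ, List.map_append]
      simp only [List.filter_cons, hb, if_true, List.filter_nil]
      congr 2
      push_cast; omega
    · have h2 : (n + 1) / 2 = n / 2 := by omega
      have hb : (PySem.Int.mod (n : Int) 2 == 1) = false := by
        simp only [pv_mod_two]; simp; omega
      rw [h2]
      simp only [List.filter_cons, hb, Bool.false_eq_true, if_false, List.filter_nil, List.append_nil]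

lemma pv_even_loop (chars : List String) (f : Nat → String) (m : Nat)
    (h : m + 1 ≤ (chars.length + 1) / 2) :
    (PySem.List.pyRange 0 (m : Int) 1).foldl
      (fun nc i => PySem.List.pySetD nc
        (PySem.List.pyGetD ((List.range ((chars.length + 1) / 2)).map (fun i => ((2 * i : Nat) : Int))) i 0)
        (PySem.List.pyGetD chars
          (PySem.List.pyGetD ((List.range ((chars.length + 1) / 2)).map (fun i => ((2 * i : Nat) : Int))) (i + 1) 0) ""))
      ((List.range chars.length).map f)
    = (List.range chars.length).map
        (fun j => if j % 2 = 0 ∧ j < 2 * m then chars.getD (j + 2) "" else f j) := by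
  induction m generalizing f with
  | zero =>
    rw [PySem.List.pyRange_one_eq_nil (by norm_num), List.foldl_nil]
    apply List.map_congr_left
    intro j hj
    rw [if_neg (by omega)]
  | succ m ih =>
    have hc : ((m + 1 : Nat) : Int) = (m : Int) + 1 := by push_cast; ring
    rw [hc, PySem.List.pyRange_one_succ_right (by positivity), List.foldl_append,
      ih f (by omega), List.foldl_cons, List.foldl_nil]
    have he1 : PySem.List.pyGetD ((List.range ((chars.length + 1) / 2)).map (fun i => ((2 * i : Nat) : Int))) (m : Int) 0
        = ((2 * m : Nat) : Int) := by
      rw [PySem.List.pyGetD_natCast, pv_getD_map_range _ _ _ _ (by omega)]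
    have he2 : PySem.List.pyGetD ((List.range ((chars.length + 1) / 2)).map (fun i => ((2 * i : Nat) : Int))) ((m : Int) + 1) 0
        = ((2 * (m + 1) : Nat) : Int) := by
      have : ((m : Int) + 1) = ((m + 1 : Nat) : Int) := by push_cast; ring
      rw [this, PySem.List.pyGetD_natCast, pv_getD_map_range _ _ _ _ (by omega)]
    rw [he1, he2, PySem.List.pyGetD_natCast, PySem.List.pySetD_natCast,
      pv_set_map_range _ _ _ _ (by omega)]
    apply List.map_congr_left
    intro j hj
    rw [List.mem_range] at hj
    by_cases h1 : j = 2 * m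
    · rw [if_pos h1, if_pos (by omega)]
      subst h1
      congr 1
    · rw [if_neg h1]
      by_cases h2 : j % 2 = 0 ∧ j < 2 * m
      · rw [if_pos h2, if_pos (by omega)]
      · rw [if_neg h2, if_neg (by omega)]

lemma pv_odd_loop (chars : List String) (f : Nat → String) (a : Nat)
    (h : a + 1 ≤ chars.length / 2) :
    (PySem.List.pyRange (a : Int) 0 (-1)).foldl
      (fun nc i => PySem.List.pySetD nc
        (PySem.List.pyGetD ((List.range (chars.length / 2)).map (fun i => ((2 * i + 1 : Nat) : Int))) i 0)
        (PySem.List.pyGetD chars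
          (PySem.List.pyGetD ((List.range (chars.length / 2)).map (fun i => ((2 * i + 1 : Nat) : Int))) (i - 1) 0) ""))
      ((List.range chars.length).map f)
    = (List.range chars.length).map
        (fun j => if j % 2 = 1 ∧ 3 ≤ j ∧ j ≤ 2 * a + 1 then chars.getD (j - 2) "" else f j) := by
  induction a generalizing f with
  | zero =>
    rw [PySem.List.pyRange_neg_one_eq_nil (by norm_num), List.foldl_nil]
    apply List.map_congr_left
    intro j hj
    rw [if_neg (by omega)]
  | succ a ih =>
    have hc : ((a + 1 : Nat) : Int) = (a : Int) + 1 := by push_cast; ring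
    rw [hc, PySem.List.pyRange_neg_one_cons (by positivity), List.foldl_cons]
    have hg1 : PySem.List.pyGetD ((List.range (chars.length / 2)).map (fun i => ((2 * i + 1 : Nat) : Int))) ((a : Int) + 1) 0
        = ((2 * (a + 1) + 1 : Nat) : Int) := by
      have hca : ((a : Int) + 1) = ((a + 1 : Nat) : Int) := by push_cast; ring
      rw [hca, PySem.List.pyGetD_natCast, pv_getD_map_range _ _ _ _ (by omega)]
    have hg2 : PySem.List.pyGetD ((List.range (chars.length / 2)).map (fun i => ((2 * i + 1 : Nat) : Int))) ((a : Int) + 1 - 1) 0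
        = ((2 * a + 1 : Nat) : Int) := by
      have hca : ((a : Int) + 1 - 1) = ((a : Nat) : Int) := by ring
      rw [hca, PySem.List.pyGetD_natCast, pv_getD_map_range _ _ _ _ (by omega)]
    have hstep : ((a : Int) + 1 - 1) = (a : Int) := by ring
    rw [hg1, hg2, PySem.List.pyGetD_natCast, PySem.List.pySetD_natCast,
      pv_set_map_range _ _ _ _ (by omega), hstep, ih _ (by omega)]
    apply List.map_congr_left
    intro j hj
    rw [List.mem_range] at hj
    by_cases h1 : j % 2 = 1 ∧ 3 ≤ j ∧ j ≤ 2 * a + 1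
    · rw [if_pos h1, if_pos (by omega)]
    · rw [if_neg h1]
      by_cases h2 : j = 2 * (a + 1) + 1
      · rw [if_pos h2, if_pos (by omega)]
        subst h2
        congr 1
      · rw [if_neg h2, if_neg (by omega)]


lemma pv_alt_eq (chars : List String) :
    shift_odd_even_alt chars = (List.range chars.length).map (fun j =>
      chars.getD (if j % 2 = 0 then (if j + 2 < chars.length then j + 2 else 0)
                  else (if 3 ≤ j then j - 2 else chars.length - 1 - chars.length % 2)) "") := by
  unfold shift_odd_even_alt
  simp only [PySem.List.len_eq, PySem.List.pyRange_one, List.map_map, Int.sub_zero, Int.toNat_natCast]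
  apply List.map_congr_left
  intro j hj
  rw [List.mem_range] at hj
  simp only [Function.comp_apply, pv_mod_two]
  by_cases h1 : j % 2 = 0
  · rw [if_pos (by omega), if_pos h1]
    by_cases h2 : j + 2 < chars.length
    · rw [if_pos (by omega : (0:Int) + (j:Int) + 2 < (chars.length:Int)), if_pos h2]
      have : ((0:Int) + (j:Int) + 2) = ((j + 2 : Nat) : Int) := by omega
      rw [this, PySem.List.pyGetD_natCast]
    · rw [if_neg (by omega : ¬ ((0:Int) + (j:Int) + 2 < (chars.length:Int))), if_neg h2]
      rw [PySem.List.pyGetD_zero]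
  · rw [if_neg (by omega), if_neg h1]
    by_cases h3 : 3 ≤ j
    · rw [if_pos (by omega : (3:Int) ≤ 0 + (j:Int)), if_pos h3]
      have : ((0:Int) + (j:Int) - 2) = ((j - 2 : Nat) : Int) := by omega
      rw [this, PySem.List.pyGetD_natCast]
    · rw [if_neg (by omega : ¬ ((3:Int) ≤ 0 + (j:Int))), if_neg h3]
      have : ((chars.length : Int) - 1 - (chars.length : Int) % 2)
          = ((chars.length - 1 - chars.length % 2 : Nat) : Int) := by omega
      rw [this, PySem.List.pyGetD_natCast]

lemma pv_even_loop' (chars : List String) (f : Nat → String) (m : Nat)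
    (h : m + 1 ≤ (chars.length + 1) / 2) (l : List String)
    (hl : l = (List.range chars.length).map f) :
    (PySem.List.pyRange 0 (m : Int) 1).foldl
      (fun nc i => PySem.List.pySetD nc
        (PySem.List.pyGetD ((List.range ((chars.length + 1) / 2)).map (fun i => ((2 * i : Nat) : Int))) i 0)
        (PySem.List.pyGetD chars
          (PySem.List.pyGetD ((List.range ((chars.length + 1) / 2)).map (fun i => ((2 * i : Nat) : Int))) (i + 1) 0) ""))
      l
    = (List.range chars.length).map
        (fun j => if j % 2 = 0 ∧ j < 2 * m then chars.getD (j + 2) "" else f j) := by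
  rw [hl]; exact pv_even_loop chars f m h

lemma pv_main (chars : List String) : shift_odd_even chars = shift_odd_even_alt chars := by
  rcases Nat.eq_zero_or_pos chars.length with h0 | h0
  · have : chars = [] := List.eq_nil_of_length_eq_zero h0
    subst this
    rfl
  · unfold shift_odd_even
    simp only [PySem.List.len_eq, pv_ev_eq, pv_od_eq]
    have hk0 : ¬ ((chars.length + 1) / 2 = 0) := by omega
    by_cases hn2 : 2 ≤ chars.length
    · have hm0 : ¬ (chars.length / 2 = 0) := by omega
      simp only [ne_eq, List.map_eq_nil_iff, List.range_eq_nil, hk0, hm0, not_false_eq_true,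
        if_true, List.length_map, List.length_range]
      have hk1 : ((((chars.length + 1) / 2 : Nat)) : Int) - 1 = (((chars.length + 1) / 2 - 1 : Nat) : Int) := by omega
      have hm1 : (((chars.length / 2 : Nat)) : Int) - 1 = ((chars.length / 2 - 1 : Nat) : Int) := by omega
      rw [hk1, hm1,
        pv_even_loop' chars _ ((chars.length + 1) / 2 - 1) (by omega) chars (pv_map_range_getD chars).symm]
      have hne : ((List.range ((chars.length + 1) / 2)).map (fun i => ((2 * i : Nat) : Int))) ≠ [] := by
        simp [hk0]
      rw [PySem.List.pyGetD_neg_one _ _ hne, pv_getLast_map_range,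
        PySem.List.pyGetD_zero, pv_getD_map_range _ _ _ _ (by omega),
        PySem.List.pyGetD_natCast, PySem.List.pySetD_natCast,
        pv_set_map_range _ _ _ _ (by omega),
        pv_odd_loop chars _ (chars.length / 2 - 1) (by omega)]
      have hno : ((List.range (chars.length / 2)).map (fun i => ((2 * i + 1 : Nat) : Int))) ≠ [] := by
        simp [hm0]
      rw [PySem.List.pyGetD_neg_one _ _ hno, pv_getLast_map_range,
        PySem.List.pyGetD_zero, pv_getD_map_range _ _ _ _ (by omega),
        PySem.List.pyGetD_natCast, PySem.List.pySetD_natCast,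
        pv_set_map_range _ _ _ _ (by omega), pv_alt_eq]
      apply List.map_congr_left
      intro j hj
      rw [List.mem_range] at hj
      by_cases hpar : j % 2 = 0
      · rw [if_neg (by omega), if_neg (by omega)]
        by_cases hlt : j + 2 < chars.length
        · rw [if_neg (by omega), if_pos (by omega), if_pos hpar, if_pos hlt]
        · rw [if_pos (by omega), if_pos hpar, if_neg hlt]
      · by_cases h3 : 3 ≤ j
        · rw [if_neg (by omega), if_pos (by omega), if_neg hpar, if_pos h3]
        · rw [if_pos (by omega), if_neg hpar, if_neg h3]
          congr 1
          omega
    · have hn1 : chars.length = 1 := by omega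
      have hm0 : chars.length / 2 = 0 := by omega
      simp only [ne_eq, List.map_eq_nil_iff, List.range_eq_nil, hk0, hm0, not_false_eq_true,
        if_true, not_true, if_false, List.length_map, List.length_range]
      obtain ⟨c, rfl⟩ := List.length_eq_one_iff.mp hn1
      norm_num
      have hg : PySem.List.pyGetD [(0 : Int)] (-1) 0 = 0 := by decide
      rw [hg, pv_alt_eq]
      have hs : PySem.List.pySetD [c] 0 c = [c].set 0 c := PySem.List.pySetD_natCast [c] 0 c
      rw [hs]
      norm_num

-- ===== VERDICT (by name: the statement is the Claim_ definition above) =====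
theorem shift_odd_even_spec : Claim_equal_shift_odd_even := by
  intro chars _
  exact pv_main chars
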